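-- pv_equiv track=rewrite | github.com/MrBrantCode/unitest_baseline | mut_generate/mist_train_cf/cf_77246/solution.py | is_2d_array_ordered
-- ===== SOURCE A (Python) =====
-- def is_2d_array_ordered(matrix):
--     # get the number of rows and columns
--     rows, cols = len(matrix), len(matrix[0])
--
--     # check each element
--     for i in range(rows):
--         for j in range(cols):
--             # check right neighbor if exists
--             if j < cols - 1 and matrix[i][j] > matrix[i][j+1]:
--                 return False
--
--             # check below neighbor if exists
--             if i < rows - 1 and matrix[i][j] > matrix[i+1][j]:
--                 return False
--
--     # if no out-of-order elements found, return True
--     return True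
-- ===== SOURCE B (Python) =====
-- def is_2d_array_ordered(matrix):
--     rows, cols = len(matrix), len(matrix[0])
--     # collect every line that must be non-decreasing: the rows (first cols
--     # entries) and the columns, then test each by comparing it with its
--     # sorted copy -- a list is non-decreasing iff it equals sorted(itself).
--     lines = [[matrix[i][j] for j in range(cols)] for i in range(rows)]
--     lines += [[matrix[i][j] for i in range(rows)] for j in range(cols)]
--     return all(line == sorted(line) for line in lines)
-- ===== Notes on version B (the rewrite author's own statement) =====
-- stated objective: alternative
-- what changed: Replaces A's interleaved nested index loop with neighbour guards and early returns by materialising each row and column as a line and testing each line with the sorted-copy idiom 'line == sorted(line)' (a list is non-decreasing iff it equals its sorted copy).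
-- outside the precondition, e.g. on is_2d_array_ordered([[1, 2], [0]]): A returns False, B raises IndexError; on is_2d_array_ordered([]): A raises IndexError, B raises IndexError
import Mathlib
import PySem

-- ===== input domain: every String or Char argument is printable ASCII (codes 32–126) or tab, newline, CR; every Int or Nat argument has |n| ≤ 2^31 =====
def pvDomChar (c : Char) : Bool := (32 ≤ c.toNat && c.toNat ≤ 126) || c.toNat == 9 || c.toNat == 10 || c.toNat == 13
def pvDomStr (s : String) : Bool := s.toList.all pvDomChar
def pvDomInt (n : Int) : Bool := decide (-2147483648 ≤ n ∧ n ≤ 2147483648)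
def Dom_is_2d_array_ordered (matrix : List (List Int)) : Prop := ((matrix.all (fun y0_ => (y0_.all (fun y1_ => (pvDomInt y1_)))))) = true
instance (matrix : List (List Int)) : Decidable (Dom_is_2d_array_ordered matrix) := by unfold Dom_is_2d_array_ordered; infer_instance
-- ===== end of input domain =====

-- B materialises every row and column as a line and tests each line with the
-- sorted-copy idiom line == sorted(line), instead of A's interleaved nested
-- index loop with neighbour guards and early returns (objective: alternative).

-- ===== PORT A =====
-- matrix[i][j]; Pre_ keeps every access in range (out of range = IndexError in Python)
def aGet (m : List (List Int)) (i j : Int) : Int :=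
  (PySem.List.pyGet? ((PySem.List.pyGet? m i).getD []) j).getD 0

-- inner 'for j in range(cols)' loop body of A; none = fell through, some false = 'return False'
def aLoopJ (m : List (List Int)) (rows cols i : Int) : List Int → Option Bool
  | [] => none
  | j :: js =>
    if j < cols - 1 ∧ aGet m i j > aGet m i (j + 1) then some false
    else if i < rows - 1 ∧ aGet m i j > aGet m (i + 1) j then some false
    else aLoopJ m rows cols i js

-- outer 'for i in range(rows)' loop of A
def aLoopI (m : List (List Int)) (rows cols : Int) : List Int → Option Bool
  | [] => none
  | i :: is' =>
    match aLoopJ m rows cols i (PySem.List.pyRange 0 cols 1) with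
    | some b => some b
    | none => aLoopI m rows cols is'

def is_2d_array_ordered (matrix : List (List Int)) : Bool :=
  let rows : Int := matrix.length
  let cols : Int := ((PySem.List.pyGet? matrix 0).getD []).length
  (aLoopI matrix rows cols (PySem.List.pyRange 0 rows 1)).getD true

-- ===== PORT B =====
def bGet (m : List (List Int)) (i j : Int) : Int :=
  (PySem.List.pyGet? ((PySem.List.pyGet? m i).getD []) j).getD 0

def is_2d_array_ordered_alt (matrix : List (List Int)) : Bool :=
  let rows : Int := matrix.length
  let cols : Int := ((PySem.List.pyGet? matrix 0).getD []).length
  let rowLines := (PySem.List.pyRange 0 rows 1).map fun i =>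
    (PySem.List.pyRange 0 cols 1).map fun j => bGet matrix i j
  let colLines := (PySem.List.pyRange 0 cols 1).map fun j =>
    (PySem.List.pyRange 0 rows 1).map fun i => bGet matrix i j
  (rowLines ++ colLines).all fun line =>
    line == PySem.List.sorted line (fun x => x) false

-- ===== PRECONDITION & SPEC =====
-- Pre_ excludes the empty matrix and ragged matrices with some row shorter than the first row:
-- there Python A raises IndexError (unless an earlier violation returns False first, an accident
-- of A's scan order that B does not reproduce — B may raise there).
def Pre_is_2d_array_ordered (matrix : List (List Int)) : Prop :=
  matrix ≠ [] ∧ ∀ row ∈ matrix, (matrix.headD []).length ≤ row.length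
instance (matrix : List (List Int)) : Decidable (Pre_is_2d_array_ordered matrix) := by
  unfold Pre_is_2d_array_ordered; infer_instance

def pvWitness_is_2d_array_ordered : List (List Int) := [[1, 2], [3, 4]]

def Spec_is_2d_array_ordered (matrix : List (List Int)) (out : Bool) : Prop := out = is_2d_array_ordered_alt matrix
instance (matrix : List (List Int)) (out : Bool) : Decidable (Spec_is_2d_array_ordered matrix out) := by unfold Spec_is_2d_array_ordered; infer_instance

-- ===== CLAIM (what is proved, stated in full; the proofs are below) =====
def Claim_equal_is_2d_array_ordered : Prop := ∀ (matrix : List (List Int)), Dom_is_2d_array_ordered matrix → Pre_is_2d_array_ordered matrix → Spec_is_2d_array_ordered matrix (is_2d_array_ordered matrix)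

-- ===== LEMMAS AND PROOFS =====

theorem aLoopJ_none_iff (m : List (List Int)) (rows cols i : Int) (js : List Int) :
    aLoopJ m rows cols i js = none ↔
      ∀ j ∈ js, ¬(j < cols - 1 ∧ aGet m i j > aGet m i (j + 1)) ∧
                ¬(i < rows - 1 ∧ aGet m i j > aGet m (i + 1) j) := by
  induction js with
  | nil => simp [aLoopJ]
  | cons j js ih =>
    simp only [aLoopJ]
    split_ifs with h1 h2
    · simp only [List.mem_cons]
      constructor
      · intro h; cases h
      · intro h; exact absurd h1 (h j (Or.inl rfl)).1
    · simp only [List.mem_cons]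
      constructor
      · intro h; cases h
      · intro h; exact absurd h2 (h j (Or.inl rfl)).2
    · rw [ih]
      constructor
      · intro h j' hj'
        rcases List.mem_cons.1 hj' with rfl | hm
        · exact ⟨h1, h2⟩
        · exact h j' hm
      · intro h j' hj'; exact h j' (List.mem_cons_of_mem _ hj')

theorem aLoopI_none_iff (m : List (List Int)) (rows cols : Int) (is' : List Int) :
    aLoopI m rows cols is' = none ↔
      ∀ i ∈ is', aLoopJ m rows cols i (PySem.List.pyRange 0 cols 1) = none := by
  induction is' with
  | nil => simp [aLoopI]
  | cons i is' ih =>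
    simp only [aLoopI]
    cases h : aLoopJ m rows cols i (PySem.List.pyRange 0 cols 1) with
    | some b =>
      constructor
      · intro hc; exact (Option.some_ne_none b hc).elim
      · intro hall
        have hi := hall i (by simp)
        rw [h] at hi
        exact (Option.some_ne_none b hi).elim
    | none =>
      rw [ih]
      constructor
      · intro hall i' hi'
        rcases List.mem_cons.1 hi' with rfl | hm
        · exact h
        · exact hall i' hm
      · intro hall i' hi'; exact hall i' (List.mem_cons_of_mem _ hi')

theorem aLoopJ_ne_none (m : List (List Int)) (rows cols i : Int) (js : List Int)
    (h : aLoopJ m rows cols i js ≠ none) : aLoopJ m rows cols i js = some false := by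
  induction js with
  | nil => exact absurd rfl h
  | cons j js ih =>
    simp only [aLoopJ] at *
    split_ifs at h ⊢ with h1 h2
    · rfl
    · rfl
    · exact ih h

theorem aLoopI_ne_none (m : List (List Int)) (rows cols : Int) (is' : List Int)
    (h : aLoopI m rows cols is' ≠ none) : aLoopI m rows cols is' = some false := by
  induction is' with
  | nil => exact absurd rfl h
  | cons i is' ih =>
    simp only [aLoopI] at h ⊢
    cases hj : aLoopJ m rows cols i (PySem.List.pyRange 0 cols 1) with
    | some b =>
      have hv := aLoopJ_ne_none m rows cols i _ (by rw [hj]; simp)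
      rw [hj] at hv
      exact hv
    | none => rw [hj] at h; exact ih h

theorem a_true_iff (matrix : List (List Int)) :
    is_2d_array_ordered matrix = true ↔
      aLoopI matrix matrix.length ((PySem.List.pyGet? matrix 0).getD []).length
        (PySem.List.pyRange 0 (matrix.length : Int) 1) = none := by
  simp only [is_2d_array_ordered]
  cases h : aLoopI matrix matrix.length ((PySem.List.pyGet? matrix 0).getD []).length
      (PySem.List.pyRange 0 (matrix.length : Int) 1) with
  | none => simp
  | some b =>
    have hf := aLoopI_ne_none matrix matrix.length
      ((PySem.List.pyGet? matrix 0).getD []).length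
      (PySem.List.pyRange 0 (matrix.length : Int) 1) (by rw [h]; simp)
    rw [h] at hf
    injection hf with hb
    subst hb
    simp

-- a list equals its sorted copy iff it is non-decreasing
theorem eq_sorted_iff (l : List Int) :
    (l == PySem.List.sorted l (fun x => x) false) = true ↔ l.Pairwise (· ≤ ·) := by
  rw [beq_iff_eq]
  constructor
  · intro h
    have hp := PySem.List.sorted_pairwise l (fun x => x) (κ := Int)
    rw [← h] at hp
    exact hp
  · intro h
    exact (PySem.List.sorted_eq_self_of_pairwise l (fun x => x) h).symm

-- a comprehension over range(n) is non-decreasing iff adjacent values are ordered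
theorem pairwise_map_pyRange_iff (f : Int → Int) (n : Int) :
    ((PySem.List.pyRange 0 n 1).map f).Pairwise (· ≤ ·) ↔
      ∀ k : Int, 0 ≤ k → k + 1 < n → f k ≤ f (k + 1) := by
  rw [← List.isChain_iff_pairwise, List.isChain_iff_getElem]
  simp only [PySem.List.pyRange_one, List.map_map, List.length_map, List.length_range,
    List.getElem_map, List.getElem_range, Function.comp, Int.sub_zero, zero_add]
  constructor
  · intro h k hk0 hk1
    have := h k.toNat (by omega)
    have e1 : ((k.toNat : Int)) = k := by omega
    have e2 : ((k.toNat + 1 : Nat) : Int) = k + 1 := by omega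
    rw [e1, e2] at this
    exact this
  · intro h i hi
    have := h (i : Int) (by omega) (by omega)
    have e2 : ((i + 1 : Nat) : Int) = (i : Int) + 1 := by push_cast; ring
    rw [e2]
    exact this

-- ===== VERDICT (by name: the statement is the Claim_ definition above) =====
theorem is_2d_array_ordered_spec : Claim_equal_is_2d_array_ordered := by
  intro matrix _ _
  unfold Spec_is_2d_array_ordered
  rw [Bool.eq_iff_iff, a_true_iff, aLoopI_none_iff]
  simp only [is_2d_array_ordered_alt, List.all_append, Bool.and_eq_true, List.all_eq_true,
    List.mem_map, PySem.List.mem_pyRange_one, forall_exists_index, and_imp]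
  constructor
  · intro h
    simp only [aLoopJ_none_iff, PySem.List.mem_pyRange_one, gt_iff_lt, not_and, not_lt, and_imp] at h
    constructor
    · rintro line i hi0 hin rfl
      rw [eq_sorted_iff, pairwise_map_pyRange_iff]
      intro k hk0 hk1
      exact (h i hi0 hin k hk0 (by omega)).1 (by omega)
    · rintro line j hj0 hjn rfl
      rw [eq_sorted_iff, pairwise_map_pyRange_iff]
      intro k hk0 hk1
      exact (h k hk0 (by omega) j hj0 hjn).2 (by omega)
  · rintro ⟨hr, hc⟩ i hi0 hin
    rw [aLoopJ_none_iff]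
    intro j hjmem
    rw [PySem.List.mem_pyRange_one] at hjmem
    obtain ⟨hj0, hjn⟩ := hjmem
    have hrow := hr _ i hi0 hin rfl
    rw [eq_sorted_iff, pairwise_map_pyRange_iff] at hrow
    have hcol := hc _ j hj0 hjn rfl
    rw [eq_sorted_iff, pairwise_map_pyRange_iff] at hcol
    constructor
    · rintro ⟨hjc, hgt⟩
      have := hrow j hj0 (by omega)
      unfold bGet aGet at *
      omega
    · rintro ⟨hir, hgt⟩
      have := hcol i hi0 (by omega)
      unfold bGet aGet at *
      omega
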